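-- pv_equiv track=rewrite | github.com/mariecordes/gridgpt | src/gridgpt/crosswords.py | order_cell_numbers
-- ===== SOURCE A (Python) =====
-- from typing import List, Tuple, Dict, Optional
--
-- def order_cell_numbers(slots: List[Tuple[int, int, str, int]]) -> Dict[Tuple[int, int, str], int]:
--     """Orders cell numbers for clues."""
--     numbered_cells = set()
--     cell_numbers: Dict[Tuple[int, int, str], int] = {}
--     next_number = 1
--
--     sorted_slots = sorted(slots, key=lambda x: (x[0], x[1], 0 if x[2] == "across" else 1))
--
--     for row, col, direction, length in sorted_slots:
--         if (row, col) not in numbered_cells: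
--             cell_numbers[(row, col, direction)] = next_number
--             numbered_cells.add((row, col))
--             next_number += 1
--
--     return cell_numbers
-- ===== SOURCE B (Python) =====
-- from typing import List, Tuple, Dict
--
-- def order_cell_numbers(slots: List[Tuple[int, int, str, int]]) -> Dict[Tuple[int, int, str], int]:
--     """Orders cell numbers for clues."""
--     # One unordered pass: remember, per starting cell, the direction that wins
--     # ("across" beats anything; otherwise the first direction seen).
--     rep: Dict[Tuple[int, int], str] = {}
--     for row, col, direction, _length in slots:
--         if (row, col) not in rep or (direction == "across" and rep[(row, col)] != "across"):
--             rep[(row, col)] = direction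
--     # Sort only the distinct cells and number them 1, 2, ...
--     return {
--         (row, col, d): i
--         for i, ((row, col), d) in enumerate(sorted(rep.items(), key=lambda kv: kv[0]), 1)
--     }
-- ===== Notes on version B (the rewrite author's own statement) =====
-- stated objective: alternative
-- what changed: B replaces A's sort-all-slots-then-scan-with-a-visited-set by one unordered pass that records a winning direction per starting cell in a dict ('across' beats anything, otherwise the first direction seen), then sorts only the distinct cells and numbers them with enumerate.
import Mathlib
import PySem

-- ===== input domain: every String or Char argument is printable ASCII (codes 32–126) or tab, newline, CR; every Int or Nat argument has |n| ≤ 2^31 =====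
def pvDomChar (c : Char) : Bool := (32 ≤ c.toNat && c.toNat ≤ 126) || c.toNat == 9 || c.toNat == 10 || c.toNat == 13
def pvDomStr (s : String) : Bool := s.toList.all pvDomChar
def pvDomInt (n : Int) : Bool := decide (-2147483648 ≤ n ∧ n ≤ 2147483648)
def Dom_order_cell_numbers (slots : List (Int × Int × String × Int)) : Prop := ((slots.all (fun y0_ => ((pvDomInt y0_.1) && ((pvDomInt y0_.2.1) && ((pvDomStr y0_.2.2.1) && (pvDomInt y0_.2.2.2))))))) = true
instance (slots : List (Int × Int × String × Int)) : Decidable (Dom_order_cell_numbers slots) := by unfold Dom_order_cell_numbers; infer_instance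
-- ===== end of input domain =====

-- B replaces A's sort-all-slots-then-scan-with-a-visited-set by one unordered pass that
-- records a winning direction per starting cell, then sorts and numbers only the distinct
-- cells (objective: alternative decomposition; same asymptotic cost).

-- ===== PORT A =====
def order_cell_numbers (slots : List (Int × Int × String × Int)) : List (Int × Int × String × Int) :=
  (((PySem.List.sorted slots
      (fun x => toLex ((x.1 : Int), toLex ((x.2.1 : Int), (if x.2.2.1 = "across" then (0:Int) else 1)))) false).foldl
    (fun (st : PySem.Set (Int × Int) × PySem.Dict (Int × Int × String) Int × Int) x =>
      if PySem.Set.contains st.1 (x.1, x.2.1) then st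
      else (PySem.Set.add st.1 (x.1, x.2.1),
            PySem.Dict.insert st.2.1 (x.1, x.2.1, x.2.2.1) st.2.2,
            st.2.2 + 1))
    (PySem.Set.empty, PySem.Dict.empty, (1 : Int))).2.1).items.map
      (fun p => (p.1.1, p.1.2.1, p.1.2.2, p.2))

-- ===== PORT B =====
def order_cell_numbers_alt (slots : List (Int × Int × String × Int)) : List (Int × Int × String × Int) :=
  (PySem.List.enumerate
    (PySem.List.sorted
      ((slots.foldl
        (fun (rep : PySem.Dict (Int × Int) String) x =>
          if PySem.Dict.contains rep (x.1, x.2.1) = false ∨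
             (x.2.2.1 = "across" ∧ PySem.Dict.get? rep (x.1, x.2.1) ≠ some "across")
          then PySem.Dict.insert rep (x.1, x.2.1) x.2.2.1 else rep)
        PySem.Dict.empty).items)
      (fun kv => toLex kv.1) false) 1).map
    (fun q => (q.2.1.1, q.2.1.2, q.2.2, q.1))

-- ===== PRECONDITION & SPEC =====
def Spec_order_cell_numbers (slots : List (Int × Int × String × Int)) (out : List (Int × Int × String × Int)) : Prop := out = order_cell_numbers_alt slots
instance (slots : List (Int × Int × String × Int)) (out : List (Int × Int × String × Int)) : Decidable (Spec_order_cell_numbers slots out) := by unfold Spec_order_cell_numbers; infer_instance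

-- ===== CLAIM (what is proved, stated in full; the proofs are below) =====
def Claim_equal_order_cell_numbers : Prop := ∀ (slots : List (Int × Int × String × Int)), Dom_order_cell_numbers slots → Spec_order_cell_numbers slots (order_cell_numbers slots)

-- ===== LEMMAS AND PROOFS =====

-- Proof-side abbreviations for the two programs' ingredients.
def pvCell (x : Int × Int × String × Int) : Int × Int := (x.1, x.2.1)

def pvDir (x : Int × Int × String × Int) : String := x.2.2.1

def pvKey3 (x : Int × Int × String × Int) : Int ×ₗ (Int ×ₗ Int) :=
  toLex ((x.1 : Int), toLex ((x.2.1 : Int), (if x.2.2.1 = "across" then (0:Int) else 1)))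

def pvAtc (c : Int × Int) (x : Int × Int × String × Int) : Bool := decide (pvCell x = c)

def pvAcr (c : Int × Int) (x : Int × Int × String × Int) : Bool :=
  pvAtc c x && decide (pvDir x = "across")

def pvNon (c : Int × Int) (x : Int × Int × String × Int) : Bool :=
  pvAtc c x && !(decide (pvDir x = "across"))

def pvHasAcross (l : List (Int × Int × String × Int)) (c : Int × Int) : Bool := l.any (pvAcr c)

def pvFirstDir (l : List (Int × Int × String × Int)) (c : Int × Int) : Option String :=
  ((l.filter (pvAtc c)).head?).map pvDir

def pvFirsts (seen : List (Int × Int)) : List (Int × Int × String × Int) → List (Int × Int × String × Int)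
  | [] => []
  | x :: t => if pvCell x ∈ seen then pvFirsts seen t else x :: pvFirsts (seen ++ [pvCell x]) t

-- inserting x into a key-sorted list and filtering by a constant-key predicate
lemma pv_insertBy_filter {α κ : Type} [LinearOrder κ] (key : α → κ) (p : α → Bool)
    (hconst : ∀ a b, p a = true → p b = true → key a = key b) (x : α) :
    ∀ ys : List α, ys.Pairwise (fun a b => key a ≤ key b) →
      (PySem.List.insertBy (fun a b => decide (key a < key b)) x ys).filter p
        = if p x then ys.filter p ++ [x] else ys.filter p := by
  intro ys
  induction ys with
  | nil =>
    intro _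
    cases hx : p x <;> simp [PySem.List.insertBy, hx]
  | cons y t ih =>
    intro hp
    have hyt := List.pairwise_cons.mp hp
    by_cases hlt : key x < key y
    · simp only [PySem.List.insertBy, hlt, decide_true, if_pos]
      cases hx : p x with
      | false => simp [hx]
      | true =>
        have hnil : (y :: t).filter p = [] := by
          rw [List.filter_eq_nil_iff]
          intro z hz hpz
          have hkz : key z = key x := hconst z x hpz hx
          have hyz : key y ≤ key z := by
            rcases List.mem_cons.mp hz with rfl | hz'
            · exact le_refl _
            · exact hyt.1 z hz'
          exact absurd (lt_of_lt_of_le hlt (hkz ▸ hyz)) (lt_irrefl _)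
        simp [hx, hnil]
    · simp only [PySem.List.insertBy, hlt, decide_false, Bool.false_eq_true, if_neg,
        not_false_iff]
      have iht := ih hp.of_cons
      cases hx : p x <;> cases hy : p y <;>
        simp [hy, hx, iht]

lemma pv_foldl_ins_filter {α κ : Type} [LinearOrder κ] (key : α → κ) (p : α → Bool)
    (hconst : ∀ a b, p a = true → p b = true → key a = key b) :
    ∀ (xs ys : List α),
      (xs.foldl (fun acc x => PySem.List.insertBy (fun a b => decide (key a < key b)) x acc)
          (PySem.List.sorted ys key false)).filter p
        = (PySem.List.sorted ys key false).filter p ++ xs.filter p := by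
  intro xs
  induction xs with
  | nil => intro ys; simp
  | cons x xs ih =>
    intro ys
    have h1 : PySem.List.insertBy (fun a b => decide (key a < key b)) x
        (PySem.List.sorted ys key false) = PySem.List.sorted (ys ++ [x]) key false := by
      rw [PySem.List.sorted_eq_foldl_insertBy, PySem.List.sorted_eq_foldl_insertBy,
        List.foldl_append]
      rfl
    rw [List.foldl_cons, h1, ih (ys ++ [x]), ← h1,
      pv_insertBy_filter key p hconst x _ (PySem.List.sorted_pairwise ys key)]
    cases hx : p x <;> simp [hx]

-- a stable sort does not move the elements of an equal-key class
lemma pv_sorted_filter_const {α κ : Type} [LinearOrder κ] (key : α → κ) (p : α → Bool)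
    (hconst : ∀ a b, p a = true → p b = true → key a = key b) (xs : List α) :
    (PySem.List.sorted xs key false).filter p = xs.filter p := by
  have h := pv_foldl_ins_filter key p hconst xs []
  simpa [PySem.List.sorted_eq_foldl_insertBy] using h

-- filtering a pairwise-ordered list by a disjunction of two classes, the second never before the first
lemma pv_filter_split {α : Type} (R : α → α → Prop) (p p₁ p₂ : α → Bool)
    (hsum : ∀ x, p x = (p₁ x || p₂ x)) (hdisj : ∀ x, ¬(p₁ x = true ∧ p₂ x = true))
    (hord : ∀ a b, p₂ a = true → p₁ b = true → ¬ R a b) :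
    ∀ l : List α, l.Pairwise R → l.filter p = l.filter p₁ ++ l.filter p₂ := by
  intro l
  induction l with
  | nil => intro _; simp
  | cons x t ih =>
    intro hp
    have hxt := List.pairwise_cons.mp hp
    have iht := ih hxt.2
    cases h1 : p₁ x with
    | true =>
      have h2 : p₂ x = false := by
        cases h2 : p₂ x
        · rfl
        · exact absurd ⟨h1, h2⟩ (hdisj x)
      have hpx : p x = true := by rw [hsum]; simp [h1]
      simp [h1, h2, hpx, iht]
    | false =>
      cases h2 : p₂ x with
      | true =>
        have hpx : p x = true := by rw [hsum]; simp [h2]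
        have hnil : t.filter p₁ = [] := by
          rw [List.filter_eq_nil_iff]
          intro z hz hpz
          exact hord x z h2 hpz (hxt.1 z hz)
        simp [h1, h2, hpx, iht, hnil]
      | false =>
        have hpx : p x = false := by rw [hsum]; simp [h1, h2]
        simp [h1, h2, hpx, iht]

lemma pv_firsts_subset : ∀ (l : List (Int × Int × String × Int)) (seen : List (Int × Int)),
    ∀ x ∈ pvFirsts seen l, x ∈ l := by
  intro l
  induction l with
  | nil => intro seen x hx; simp [pvFirsts] at hx
  | cons y t ih =>
    intro seen x hx
    by_cases hy : pvCell y ∈ seen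
    · simp only [pvFirsts, if_pos hy] at hx
      exact List.mem_cons_of_mem _ (ih seen x hx)
    · simp only [pvFirsts, if_neg hy] at hx
      rcases List.mem_cons.mp hx with rfl | hx'
      · exact List.mem_cons_self
      · exact List.mem_cons_of_mem _ (ih _ x hx')

lemma pv_key3_cell_le (a b : Int × Int × String × Int) (h : pvKey3 a ≤ pvKey3 b) :
    toLex (pvCell a) ≤ toLex (pvCell b) := by
  simp only [pvKey3] at h
  rw [Prod.Lex.le_iff] at h
  rw [Prod.Lex.le_iff]
  simp only [pvCell]
  rcases h with h | ⟨h1, h2⟩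
  · exact Or.inl h
  · rw [Prod.Lex.le_iff] at h2
    rcases h2 with h2 | ⟨h2, _⟩
    · exact Or.inr ⟨h1, le_of_lt h2⟩
    · exact Or.inr ⟨h1, le_of_eq h2⟩

lemma pv_firsts_props : ∀ (l : List (Int × Int × String × Int)) (seen : List (Int × Int)),
    l.Pairwise (fun a b => pvKey3 a ≤ pvKey3 b) →
    (∀ x ∈ pvFirsts seen l, pvCell x ∉ seen) ∧
      (pvFirsts seen l).Pairwise (fun a b => toLex (pvCell a) < toLex (pvCell b)) := by
  intro l
  induction l with
  | nil => intro seen _; simp [pvFirsts]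
  | cons x t ih =>
    intro seen hp
    have hxt := List.pairwise_cons.mp hp
    by_cases hx : pvCell x ∈ seen
    · simpa [pvFirsts, hx] using ih seen hxt.2
    · have iht := ih (seen ++ [pvCell x]) hxt.2
      constructor
      · intro y hy
        simp only [pvFirsts, if_neg hx] at hy
        rcases List.mem_cons.mp hy with rfl | hy'
        · exact hx
        · have := iht.1 y hy'
          intro hmem
          exact this (by simp [hmem])
      · simp only [pvFirsts, if_neg hx]
        rw [List.pairwise_cons]
        refine ⟨?_, iht.2⟩
        intro y hy
        have hyt : y ∈ t := pv_firsts_subset t _ y hy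
        have hle : toLex (pvCell x) ≤ toLex (pvCell y) :=
          pv_key3_cell_le x y (hxt.1 y hyt)
        have hne : pvCell y ≠ pvCell x := by
          have := iht.1 y hy
          intro hEq
          exact this (by simp [hEq])
        refine lt_of_le_of_ne hle ?_
        intro hEq
        exact hne (by simpa using hEq.symm)

lemma pv_firsts_mem : ∀ (l : List (Int × Int × String × Int)) (seen : List (Int × Int))
    (x : Int × Int × String × Int),
    x ∈ pvFirsts seen l ↔ pvCell x ∉ seen ∧ (l.filter (pvAtc (pvCell x))).head? = some x := by
  intro l
  induction l with
  | nil => intro seen x; simp [pvFirsts]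
  | cons y t ih =>
    intro seen x
    by_cases hy : pvCell y ∈ seen
    · rw [show pvFirsts seen (y :: t) = pvFirsts seen t from by simp [pvFirsts, hy], ih]
      by_cases hxy : pvCell y = pvCell x
      · have hxin : pvCell x ∈ seen := hxy ▸ hy
        simp [hxin]
      · have : pvAtc (pvCell x) y = false := by simp [pvAtc, hxy]
        simp [this]
    · rw [show pvFirsts seen (y :: t) = y :: pvFirsts (seen ++ [pvCell y]) t from by
        simp [pvFirsts, hy]]
      by_cases hxy : pvCell y = pvCell x
      · have hatc : pvAtc (pvCell x) y = true := by simp [pvAtc, hxy]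
        simp only [List.mem_cons, ih, List.filter_cons, hatc, if_pos, List.head?]
        constructor
        · rintro (rfl | ⟨hns, _⟩)
          · exact ⟨hxy ▸ hy, rfl⟩
          · exact absurd (by simp [← hxy]) hns
        · rintro ⟨hns, hsome⟩
          exact Or.inl (Option.some.inj hsome).symm
      · have hatc : pvAtc (pvCell x) y = false := by simp [pvAtc, hxy]
        simp only [List.mem_cons, ih, List.filter_cons, hatc, Bool.false_eq_true, if_neg,
          not_false_iff]
        constructor
        · rintro (rfl | ⟨hns, hsome⟩)
          · exact absurd rfl hxy
          · refine ⟨fun hmem => hns (by simp [hmem]), hsome⟩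
        · rintro ⟨hns, hsome⟩
          refine Or.inr ⟨?_, hsome⟩
          simp only [List.mem_append, List.mem_singleton]
          rintro (h | h)
          · exact hns h
          · exact hxy h.symm

-- the direction of the first slot (in sorted order) at a cell is the across-first rule
lemma pv_crux (slots : List (Int × Int × String × Int)) (c : Int × Int) :
    pvFirstDir (PySem.List.sorted slots pvKey3 false) c
      = if pvHasAcross slots c then some "across" else pvFirstDir slots c := by
  have hsum : ∀ x, pvAtc c x = (pvAcr c x || pvNon c x) := by
    intro x
    by_cases h1 : pvCell x = c <;> by_cases h2 : pvDir x = "across" <;>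
      simp [pvAtc, pvAcr, pvNon, h1, h2]
  have hdisj : ∀ x, ¬(pvAcr c x = true ∧ pvNon c x = true) := by
    intro x
    by_cases h1 : pvCell x = c <;> by_cases h2 : pvDir x = "across" <;>
      simp [pvAcr, pvNon, pvAtc, h1, h2]
  have hord : ∀ a b, pvNon c a = true → pvAcr c b = true →
      ¬ (fun a b => pvKey3 a ≤ pvKey3 b) a b := by
    intro a b ha hb
    show ¬ (pvKey3 a ≤ pvKey3 b)
    simp only [pvNon, pvAcr, pvAtc, pvDir, Bool.and_eq_true, decide_eq_true_eq,
      Bool.not_eq_true', decide_eq_false_iff_not] at ha hb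
    have hca : a.1 = c.1 ∧ a.2.1 = c.2 := by
      have := ha.1; simp [pvCell, Prod.ext_iff] at this; exact this
    have hcb : b.1 = c.1 ∧ b.2.1 = c.2 := by
      have := hb.1; simp [pvCell, Prod.ext_iff] at this; exact this
    have hka : pvKey3 a = toLex (c.1, toLex (c.2, (1:Int))) := by
      simp [pvKey3, hca.1, hca.2, if_neg ha.2]
    have hkb : pvKey3 b = toLex (c.1, toLex (c.2, (0:Int))) := by
      simp [pvKey3, hcb.1, hcb.2, hb.2]
    rw [hka, hkb]
    intro hle
    rcases Prod.Lex.le_iff.mp hle with h | ⟨-, h⟩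
    · exact lt_irrefl _ h
    · rcases Prod.Lex.le_iff.mp h with h2 | ⟨-, h2⟩
      · exact lt_irrefl _ h2
      · exact absurd (show (1:Int) ≤ 0 from h2) (by norm_num)
  have hsplit : (PySem.List.sorted slots pvKey3 false).filter (pvAtc c)
      = (PySem.List.sorted slots pvKey3 false).filter (pvAcr c)
        ++ (PySem.List.sorted slots pvKey3 false).filter (pvNon c) :=
    pv_filter_split _ _ _ _ hsum hdisj hord _ (PySem.List.sorted_pairwise slots pvKey3)
  have hconstA : ∀ a b, pvAcr c a = true → pvAcr c b = true → pvKey3 a = pvKey3 b := by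
    intro a b ha hb
    simp only [pvAcr, pvAtc, pvDir, Bool.and_eq_true, decide_eq_true_eq] at ha hb
    have hca : a.1 = c.1 ∧ a.2.1 = c.2 := by
      have := ha.1; simp [pvCell, Prod.ext_iff] at this; exact this
    have hcb : b.1 = c.1 ∧ b.2.1 = c.2 := by
      have := hb.1; simp [pvCell, Prod.ext_iff] at this; exact this
    simp [pvKey3, ha.2, hb.2, hca.1, hca.2, hcb.1, hcb.2]
  have hconstN : ∀ a b, pvNon c a = true → pvNon c b = true → pvKey3 a = pvKey3 b := by
    intro a b ha hb
    simp only [pvNon, pvAtc, pvDir, Bool.and_eq_true, decide_eq_true_eq,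
      Bool.not_eq_true', decide_eq_false_iff_not] at ha hb
    have hca : a.1 = c.1 ∧ a.2.1 = c.2 := by
      have := ha.1; simp [pvCell, Prod.ext_iff] at this; exact this
    have hcb : b.1 = c.1 ∧ b.2.1 = c.2 := by
      have := hb.1; simp [pvCell, Prod.ext_iff] at this; exact this
    simp [pvKey3, if_neg ha.2, if_neg hb.2, hca.1, hca.2, hcb.1, hcb.2]
  simp only [pvFirstDir]
  rw [hsplit, pv_sorted_filter_const pvKey3 (pvAcr c) hconstA,
    pv_sorted_filter_const pvKey3 (pvNon c) hconstN]
  by_cases hA : pvHasAcross slots c = true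
  · rw [if_pos hA]
    rcases hfa : slots.filter (pvAcr c) with _ | ⟨y, ys⟩
    · exfalso
      rw [pvHasAcross, List.any_eq_true] at hA
      obtain ⟨z, hz, hpz⟩ := hA
      have : z ∈ slots.filter (pvAcr c) := List.mem_filter.mpr ⟨hz, hpz⟩
      simp [hfa] at this
    · have hy : pvAcr c y = true := by
        have : y ∈ slots.filter (pvAcr c) := by simp [hfa]
        exact (List.mem_filter.mp this).2
      have hdir : pvDir y = "across" := by
        simp only [pvAcr, Bool.and_eq_true, decide_eq_true_eq] at hy
        exact hy.2
      simp [hdir]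
  · rw [if_neg hA]
    have hnil : slots.filter (pvAcr c) = [] := by
      rw [List.filter_eq_nil_iff]
      intro z hz hpz
      exact hA (by rw [pvHasAcross]; exact List.any_eq_true.mpr ⟨z, hz, hpz⟩)
    have hcongr : slots.filter (pvNon c) = slots.filter (pvAtc c) := by
      apply List.filter_congr
      intro z hz
      have hz2 : pvAcr c z = false := by
        cases h : pvAcr c z
        · rfl
        · exact absurd (by rw [pvHasAcross]; exact List.any_eq_true.mpr ⟨z, hz, h⟩) hA
      cases hatc : pvAtc c z
      · simp [pvNon, hatc]
      · simp only [pvAcr, hatc, Bool.true_and] at hz2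
        simp [pvNon, hatc, hz2]
    rw [hnil, hcongr, List.nil_append]

-- characterisation of B's one-pass representative dictionary
lemma pv_rep_get : ∀ (l : List (Int × Int × String × Int)) (d : PySem.Dict (Int × Int) String)
    (c : Int × Int),
    (l.foldl (fun rep x =>
        if PySem.Dict.contains rep (x.1, x.2.1) = false ∨
           (x.2.2.1 = "across" ∧ PySem.Dict.get? rep (x.1, x.2.1) ≠ some "across")
        then PySem.Dict.insert rep (x.1, x.2.1) x.2.2.1 else rep) d).get? c
      = if pvHasAcross l c then some "across" else (PySem.Dict.get? d c).or (pvFirstDir l c) := by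
  intro l
  induction l with
  | nil =>
    intro d c
    simp [pvHasAcross, pvFirstDir]
  | cons x t ih =>
    intro d c
    rw [List.foldl_cons]
    by_cases hc : (x.1, x.2.1) = c
    · subst hc
      by_cases hacr : x.2.2.1 = "across"
      · have hA : pvHasAcross (x :: t) (x.1, x.2.1) = true := by
          simp [pvHasAcross, pvAcr, pvAtc, pvCell, pvDir, hacr]
        have hd' : PySem.Dict.get?
            (if PySem.Dict.contains d (x.1, x.2.1) = false ∨
               (x.2.2.1 = "across" ∧ PySem.Dict.get? d (x.1, x.2.1) ≠ some "across")
             then PySem.Dict.insert d (x.1, x.2.1) x.2.2.1 else d) (x.1, x.2.1)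
            = some "across" := by
          split_ifs with hcond
          · rw [PySem.Dict.get?_insert_self, hacr]
          · push Not at hcond
            exact hcond.2 hacr
        rw [ih, hd', hA, if_pos rfl]
        split_ifs <;> rfl
      · have hA : pvHasAcross (x :: t) (x.1, x.2.1) = pvHasAcross t (x.1, x.2.1) := by
          simp [pvHasAcross, pvAcr, pvAtc, pvCell, pvDir, hacr]
        have hatc : pvAtc (x.1, x.2.1) x = true := by simp [pvAtc, pvCell]
        have hF : pvFirstDir (x :: t) (x.1, x.2.1) = some x.2.2.1 := by
          simp [pvFirstDir, hatc, pvDir]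
        rw [ih, hA, hF]
        by_cases hcont : PySem.Dict.contains d (x.1, x.2.1) = true
        · have hcond : ¬(PySem.Dict.contains d (x.1, x.2.1) = false ∨
              (x.2.2.1 = "across" ∧ PySem.Dict.get? d (x.1, x.2.1) ≠ some "across")) := by
            push Not
            exact ⟨by simp [hcont], fun h => absurd h hacr⟩
          rw [if_neg hcond]
          obtain ⟨v, hv⟩ : ∃ v, PySem.Dict.get? d (x.1, x.2.1) = some v := by
            apply Option.isSome_iff_exists.mp
            rw [← PySem.Dict.contains_eq_isSome_get?]
            exact hcont
          rw [hv]
          split_ifs <;> rfl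
        · have hcond : PySem.Dict.contains d (x.1, x.2.1) = false ∨
              (x.2.2.1 = "across" ∧ PySem.Dict.get? d (x.1, x.2.1) ≠ some "across") :=
            Or.inl (by simpa using hcont)
          rw [if_pos hcond, PySem.Dict.get?_insert_self]
          have hnone : PySem.Dict.get? d (x.1, x.2.1) = none :=
            (PySem.Dict.get?_eq_none_iff_contains _ _).mpr (by simpa using hcont)
          rw [hnone]
          split_ifs <;> rfl
    · have hA : pvHasAcross (x :: t) c = pvHasAcross t c := by
        simp [pvHasAcross, pvAcr, pvAtc, pvCell, hc]
      have hatc : pvAtc c x = false := by simp [pvAtc, pvCell, hc]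
      have hF : pvFirstDir (x :: t) c = pvFirstDir t c := by
        simp [pvFirstDir, hatc]
      have hd' : PySem.Dict.get?
          (if PySem.Dict.contains d (x.1, x.2.1) = false ∨
             (x.2.2.1 = "across" ∧ PySem.Dict.get? d (x.1, x.2.1) ≠ some "across")
           then PySem.Dict.insert d (x.1, x.2.1) x.2.2.1 else d) c = PySem.Dict.get? d c := by
        split_ifs
        · rw [PySem.Dict.get?_insert]
          rw [if_neg (fun h => hc h.symm)]
        · rfl
      rw [ih, hA, hF, hd']

lemma pv_rep_keys_nodup : ∀ (l : List (Int × Int × String × Int))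
    (d : PySem.Dict (Int × Int) String), d.keys.Nodup →
    (l.foldl (fun rep x =>
        if PySem.Dict.contains rep (x.1, x.2.1) = false ∨
           (x.2.2.1 = "across" ∧ PySem.Dict.get? rep (x.1, x.2.1) ≠ some "across")
        then PySem.Dict.insert rep (x.1, x.2.1) x.2.2.1 else rep) d).keys.Nodup := by
  intro l
  induction l with
  | nil => intro d hd; exact hd
  | cons x t ih =>
    intro d hd
    rw [List.foldl_cons]
    apply ih
    split_ifs
    · exact PySem.Dict.nodup_keys_insert _ _ _ hd
    · exact hd

-- the items written by A's loop, as a function of the unnumbered starting cells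
lemma pv_afold : ∀ (l : List (Int × Int × String × Int)) (seen : PySem.Set (Int × Int))
    (d : PySem.Dict (Int × Int × String) Int) (n : Int),
    (∀ k ∈ d.keys, (k.1, k.2.1) ∈ seen) →
    ((l.foldl (fun (st : PySem.Set (Int × Int) × PySem.Dict (Int × Int × String) Int × Int) x =>
        if PySem.Set.contains st.1 (x.1, x.2.1) then st
        else (PySem.Set.add st.1 (x.1, x.2.1),
              PySem.Dict.insert st.2.1 (x.1, x.2.1, x.2.2.1) st.2.2,
              st.2.2 + 1)) (seen, d, n)).2.1).items
      = d.items ++ (PySem.List.enumerate (pvFirsts seen l) n).map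
          (fun q => ((q.2.1, q.2.2.1, q.2.2.2.1), q.1)) := by
  intro l
  induction l with
  | nil => intro seen d n _; simp [pvFirsts]
  | cons x t ih =>
    intro seen d n h
    by_cases hseen : (x.1, x.2.1) ∈ seen
    · have hcont : PySem.Set.contains seen (x.1, x.2.1) = true := by
        simp [PySem.Set.contains, hseen]
      have hfirst : pvFirsts seen (x :: t) = pvFirsts seen t := by
        show (if pvCell x ∈ seen then pvFirsts seen t
              else x :: pvFirsts (seen ++ [pvCell x]) t) = pvFirsts seen t
        rw [if_pos (by simpa [pvCell] using hseen)]
      rw [List.foldl_cons]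
      simp only [hcont, hfirst]
      exact ih seen d n h
    · have hcont : PySem.Set.contains seen (x.1, x.2.1) = false := by
        simp [PySem.Set.contains, hseen]
      have hfirst : pvFirsts seen (x :: t) = x :: pvFirsts (seen ++ [(x.1, x.2.1)]) t := by
        show (if pvCell x ∈ seen then pvFirsts seen t
              else x :: pvFirsts (seen ++ [pvCell x]) t)
            = x :: pvFirsts (seen ++ [(x.1, x.2.1)]) t
        rw [if_neg (by simpa [pvCell] using hseen)]
        rfl
      have hadd : PySem.Set.add seen (x.1, x.2.1) = seen ++ [(x.1, x.2.1)] := by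
        simp [PySem.Set.add, hseen]
      have hkey : PySem.Dict.contains d (x.1, x.2.1, x.2.2.1) = false := by
        cases hct : PySem.Dict.contains d (x.1, x.2.1, x.2.2.1)
        · rfl
        · exfalso
          have : (x.1, x.2.1, x.2.2.1) ∈ d.keys :=
            (PySem.Dict.contains_iff_mem_keys _ _).mp hct
          exact hseen (h _ this)
      have h' : ∀ k ∈ (PySem.Dict.insert d (x.1, x.2.1, x.2.2.1) n).keys,
          (k.1, k.2.1) ∈ seen ++ [(x.1, x.2.1)] := by
        intro k hk
        rcases (PySem.Dict.mem_keys_insert _ _ _ _).mp hk with rfl | hk2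
        · simp
        · simp [h k hk2]
      rw [List.foldl_cons]
      simp only [hcont, Bool.false_eq_true, if_neg, not_false_iff, hadd]
      rw [ih _ _ _ h', PySem.Dict.items_insert_of_not_contains _ _ hkey, hfirst,
        PySem.List.enumerate_cons]
      simp

lemma pv_enumerate_map {α β : Type} (f : α → β) :
    ∀ (l : List α) (s : Int),
      PySem.List.enumerate (l.map f) s
        = (PySem.List.enumerate l s).map (fun q => (q.1, f q.2)) := by
  intro l
  induction l with
  | nil => intro s; simp [PySem.List.enumerate]
  | cons x t ih => intro s; simp [PySem.List.enumerate_cons, List.map, ih]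

lemma pv_mem_L (S : List (Int × Int × String × Int)) (c : Int × Int) (dv : String) :
    ((c, dv) ∈ (pvFirsts [] S).map (fun x => (pvCell x, pvDir x)))
      ↔ pvFirstDir S c = some dv := by
  rw [List.mem_map]
  constructor
  · rintro ⟨x, hx, hEq⟩
    rw [pv_firsts_mem] at hx
    have hc : pvCell x = c := ((Prod.mk.injEq _ _ _ _).mp hEq).1
    have hd : pvDir x = dv := ((Prod.mk.injEq _ _ _ _).mp hEq).2
    rw [pvFirstDir, ← hc, hx.2]
    simp [hd]
  · intro h
    rw [pvFirstDir] at h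
    rcases hh : (S.filter (pvAtc c)).head? with _ | x
    · simp [hh] at h
    · have hx : x ∈ S.filter (pvAtc c) := by
        rcases hf : S.filter (pvAtc c) with _ | ⟨z, zs⟩
        · simp [hf] at hh
        · rw [hf] at hh
          simp at hh
          simp [hh]
      have hc : pvCell x = c := by
        have := (List.mem_filter.mp hx).2
        simpa [pvAtc] using this
      have hd : pvDir x = dv := by
        rw [hh] at h
        simpa using h
      refine ⟨x, ?_, by rw [hc, hd]⟩
      rw [pv_firsts_mem]
      refine ⟨by simp, ?_⟩
      rw [hc]
      exact hh

-- ===== VERDICT (by name: the statement is the Claim_ definition above) =====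
theorem order_cell_numbers_spec : Claim_equal_order_cell_numbers := by
  intro slots _
  unfold Spec_order_cell_numbers
  have hA : order_cell_numbers slots
      = (PySem.List.enumerate (pvFirsts [] (PySem.List.sorted slots pvKey3 false)) 1).map
          (fun q => (q.2.1, q.2.2.1, q.2.2.2.1, q.1)) := by
    unfold order_cell_numbers pvKey3
    rw [pv_afold _ _ _ _ (by intro k hk; simp [PySem.Dict.keys_empty] at hk)]
    simp [List.map_map, Function.comp,
      show (PySem.Dict.empty : PySem.Dict (Int × Int × String) Int).items = [] from rfl]
  have hnodupK : (slots.foldl (fun rep x =>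
      if PySem.Dict.contains rep (x.1, x.2.1) = false ∨
         (x.2.2.1 = "across" ∧ PySem.Dict.get? rep (x.1, x.2.1) ≠ some "across")
      then PySem.Dict.insert rep (x.1, x.2.1) x.2.2.1 else rep) PySem.Dict.empty).keys.Nodup :=
    pv_rep_keys_nodup slots PySem.Dict.empty (by simp [PySem.Dict.keys_empty])
  have hM : PySem.List.sorted
      ((slots.foldl (fun rep x =>
          if PySem.Dict.contains rep (x.1, x.2.1) = false ∨
             (x.2.2.1 = "across" ∧ PySem.Dict.get? rep (x.1, x.2.1) ≠ some "across")
          then PySem.Dict.insert rep (x.1, x.2.1) x.2.2.1 else rep) PySem.Dict.empty).items)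
        (fun kv => toLex kv.1) false
      = (pvFirsts [] (PySem.List.sorted slots pvKey3 false)).map (fun x => (pvCell x, pvDir x)) := by
    have hLpair : ((pvFirsts [] (PySem.List.sorted slots pvKey3 false)).map
        (fun x => (pvCell x, pvDir x))).Pairwise (fun a b => toLex a.1 < toLex b.1) := by
      rw [List.pairwise_map]
      exact (pv_firsts_props _ []
        (by simpa using PySem.List.sorted_pairwise slots pvKey3)).2
    have hLnodup : ((pvFirsts [] (PySem.List.sorted slots pvKey3 false)).map
        (fun x => (pvCell x, pvDir x))).Nodup := by
      apply List.Pairwise.imp _ hLpair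
      intro a b hab hEq
      rw [hEq] at hab
      exact lt_irrefl _ hab
    have hInodup : ((slots.foldl (fun rep x =>
        if PySem.Dict.contains rep (x.1, x.2.1) = false ∨
           (x.2.2.1 = "across" ∧ PySem.Dict.get? rep (x.1, x.2.1) ≠ some "across")
        then PySem.Dict.insert rep (x.1, x.2.1) x.2.2.1 else rep) PySem.Dict.empty).items).Nodup :=
      List.Nodup.of_map _ hnodupK
    apply PySem.List.sorted_eq_of_perm_of_pairwise_lt
    · rw [List.perm_ext_iff_of_nodup hLnodup hInodup]
      rintro ⟨c, dv⟩
      rw [pv_mem_L, pv_crux,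
        ← PySem.Dict.get?_eq_some_iff_mem_items _ _ _ hnodupK, pv_rep_get]
      simp [PySem.Dict.get?_empty]
    · exact hLpair
  rw [hA]
  unfold order_cell_numbers_alt
  rw [hM, pv_enumerate_map, List.map_map]
  rfl
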